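-- pv_equiv track=rewrite | github.com/ShwethaAjay/Bicycle-Lane-Detection-through-Stereo-Vision | lane_detection.py | create_lines_from_points
-- ===== SOURCE A (Python) =====
-- def create_lines_from_points(points, lines = []):
--     if len(points) == 0:
--         # no more points, return collected lines
--         return lines
--     else:
--         if len(lines) == 0:
--             if len(points) == 1:
--                 raise ValueError('Cannot create line from one point')
--             # starting situation, return create_lines_from_points with args:
--             # 1: remaining points after first two points
--             # 2: line created from first two points
--             return create_lines_from_points(points[2:], [(points[0], points[1])])
--         else:
--             # mid-list situation, return create_lines_from_points with args:
--             # 1: remaining points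
--             # 2: collected lines plus a new line based on one point from
--             #    the last line and a point from the list
--             return create_lines_from_points(points[1:], lines + [(lines[-1][1], points[0])])
-- ===== SOURCE B (Python) =====
-- def create_lines_from_points(points, lines = []):
--     if len(points) == 0:
--         return lines
--     result = list(lines)
--     if not result:
--         if len(points) < 2:
--             raise ValueError('Cannot create line from one point')
--         result.append((points[0], points[1]))
--         prev = points[1]
--         start = 2
--     else:
--         prev = result[-1][1]
--         start = 0
--     for i in range(start, len(points)):
--         result.append((prev, points[i]))
--         prev = points[i]
--     return result
-- ===== Notes on version B (the rewrite author's own statement) =====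
-- stated objective: faster
-- what changed: Replaces A's recursion that rebuilds the whole list with 'lines + [..]' at every step by a single iterative pass appending to one accumulator, with the seed segment handled once up front.
import Mathlib
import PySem

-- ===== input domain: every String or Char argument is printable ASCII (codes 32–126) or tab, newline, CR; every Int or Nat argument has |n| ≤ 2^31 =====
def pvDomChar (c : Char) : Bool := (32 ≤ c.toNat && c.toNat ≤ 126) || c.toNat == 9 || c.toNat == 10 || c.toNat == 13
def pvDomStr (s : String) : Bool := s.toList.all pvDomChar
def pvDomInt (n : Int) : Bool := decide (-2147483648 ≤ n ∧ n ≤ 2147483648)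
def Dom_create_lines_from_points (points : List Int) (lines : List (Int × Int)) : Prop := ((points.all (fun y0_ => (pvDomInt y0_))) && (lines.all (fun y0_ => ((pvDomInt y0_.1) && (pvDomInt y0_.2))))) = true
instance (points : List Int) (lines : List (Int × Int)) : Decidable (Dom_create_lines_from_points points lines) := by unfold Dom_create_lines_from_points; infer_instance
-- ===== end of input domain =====

-- B: single iterative pass with one accumulator instead of A's recursion rebuilding the list each step (simpler decomposition; same results, same ValueError cases).

-- ===== PORT A =====
-- literal transliteration of A's recursion; the 'raise ValueError' branch (lines empty, exactly one point) is excluded by Pre_ and returns [] here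
def create_lines_from_points (points : List Int) (lines : List (Int × Int)) : List (Int × Int) :=
  match points with
  | [] => lines
  | p :: ps =>
    if lines.length = 0 then
      match ps with
      | [] => []  -- Python raises ValueError here; outside Pre_
      | q :: qs => create_lines_from_points qs [(p, q)]
    else
      create_lines_from_points ps (lines ++ [(lines.getLast!.2, p)])

-- ===== PORT B =====
-- the for-loop of Source B as a foldl over (result, prev)
def create_lines_from_points_alt (points : List Int) (lines : List (Int × Int)) : List (Int × Int) :=
  match points with
  | [] => lines
  | _ =>
    let init : List (Int × Int) × Int × List Int :=
      if lines.isEmpty then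
        match points with
        | p0 :: p1 :: rest => ([(p0, p1)], p1, rest)
        | _ => ([], 0, [])  -- Python raises ValueError here; outside Pre_
      else (lines, lines.getLast!.2, points)
    (init.2.2.foldl (fun (acc : List (Int × Int) × Int) p => (acc.1 ++ [(acc.2, p)], p)) (init.1, init.2.1)).1

-- ===== PRECONDITION & SPEC =====
-- Pre_ excludes exactly the inputs where A raises ValueError: lines empty and a single point
def Pre_create_lines_from_points (points : List Int) (lines : List (Int × Int)) : Prop :=
  ¬ (lines = [] ∧ points.length = 1)
instance (points : List Int) (lines : List (Int × Int)) : Decidable (Pre_create_lines_from_points points lines) := by unfold Pre_create_lines_from_points; infer_instance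
def pvWitness_create_lines_from_points : List Int × (List (Int × Int)) := ([1, 2, 3], [])

def Spec_create_lines_from_points (points : List Int) (lines : List (Int × Int)) (out : List (Int × Int)) : Prop := out = create_lines_from_points_alt points lines
instance (points : List Int) (lines : List (Int × Int)) (out : List (Int × Int)) : Decidable (Spec_create_lines_from_points points lines out) := by unfold Spec_create_lines_from_points; infer_instance

-- ===== CLAIM (what is proved, stated in full; the proofs are below) =====
def Claim_equal_create_lines_from_points : Prop := ∀ (points : List Int) (lines : List (Int × Int)), Dom_create_lines_from_points points lines → Pre_create_lines_from_points points lines → Spec_create_lines_from_points points lines (create_lines_from_points points lines)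

-- ===== LEMMAS AND PROOFS =====

-- A's recursion with a nonempty accumulator is exactly B's fold over (result, prev)
lemma chain_eq_foldl (ps : List Int) :
    ∀ (lines : List (Int × Int)), lines ≠ [] →
    create_lines_from_points ps lines =
      (ps.foldl (fun (acc : List (Int × Int) × Int) p => (acc.1 ++ [(acc.2, p)], p))
        (lines, lines.getLast!.2)).1 := by
  induction ps with
  | nil => intro lines h; simp [create_lines_from_points]
  | cons p ps ih =>
    intro lines h
    have hlen : lines.length ≠ 0 := by simpa using h
    have hlast : (lines ++ [(lines.getLast!.2, p)]).getLast! = (lines.getLast!.2, p) := by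
      simp [List.getLast!_eq_getLast?_getD]
    rw [create_lines_from_points.eq_def]; simp only []; rw [if_neg hlen, ih _ (by simp), List.foldl_cons, hlast]

-- ===== VERDICT (by name: the statement is the Claim_ definition above) =====
theorem create_lines_from_points_spec : Claim_equal_create_lines_from_points := by
  intro points lines _ hpre
  unfold Spec_create_lines_from_points
  match points with
  | [] => rfl
  | p :: ps =>
    by_cases hl : lines = []
    · subst hl
      match ps with
      | [] => exact absurd ⟨rfl, rfl⟩ hpre
      | q :: qs =>
        show create_lines_from_points (p :: q :: qs) [] = _
        rw [create_lines_from_points]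
        simp only [create_lines_from_points_alt, List.isEmpty_nil]
        by_cases hq : qs = []
        · subst hq; simp [create_lines_from_points]
        · rw [chain_eq_foldl qs [(p, q)] (by simp)]
          simp [List.getLast!_eq_getLast?_getD]
    · rw [chain_eq_foldl (p :: ps) lines hl]
      have : lines.isEmpty = false := by simpa using hl
      simp [create_lines_from_points_alt, this]
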